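-- pv_equiv track=rewrite | github.com/liu-kaining/ascii-chart | ascii_chart/renderers/ascii.py | _render_diamond
-- ===== SOURCE A (Python) =====
-- def _render_diamond(text: str, width: int) -> str:
--     """渲染菱形（决策节点）"""
--     inner_width = width - 4
--     lines = []
--     # 上半部分
--     for i in range(inner_width // 2):
--         padding = i + 1
--         lines.append(' ' * padding + '╱' + ' ' * (inner_width - padding * 2) + '╲')
--     # 中间行
--     lines.append(f" {text:^{inner_width}} ")
--     # 下半部分
--     for i in range(inner_width // 2 - 1, -1, -1):
--         padding = i + 1
--         lines.append(' ' * padding + '╲' + ' ' * (inner_width - padding * 2) + '╱')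
--     return "\n".join(lines)
-- ===== SOURCE B (Python) =====
-- def _render_diamond(text: str, width: int) -> str:
--     inner = width - 4
--     h = inner // 2
--     lines = []
--     for r in range(2 * h + 1):
--         if r == h:
--             lines.append(f" {text:^{inner}} ")
--         else:
--             p = (r if r < h else 2 * h - r) + 1
--             row = [' '] * (inner - p + 2)
--             row[p] = '\u2571' if r < h else '\u2572'
--             row[-1] = '\u2572' if r < h else '\u2571'
--             lines.append(''.join(row))
--     return "\n".join(lines)
-- ===== Notes on version B (the rewrite author's own statement) =====
-- stated objective: alternative
-- what changed: B replaces A's two symmetric concatenation loops with a single pass over all output rows: each row's padding is computed from its distance to the centre row and the two glyphs are written into a space-filled cell list by index assignment.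
-- outside the precondition, e.g. on _render_diamond('x', 3): A raises ValueError, B returns ''
import Mathlib
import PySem

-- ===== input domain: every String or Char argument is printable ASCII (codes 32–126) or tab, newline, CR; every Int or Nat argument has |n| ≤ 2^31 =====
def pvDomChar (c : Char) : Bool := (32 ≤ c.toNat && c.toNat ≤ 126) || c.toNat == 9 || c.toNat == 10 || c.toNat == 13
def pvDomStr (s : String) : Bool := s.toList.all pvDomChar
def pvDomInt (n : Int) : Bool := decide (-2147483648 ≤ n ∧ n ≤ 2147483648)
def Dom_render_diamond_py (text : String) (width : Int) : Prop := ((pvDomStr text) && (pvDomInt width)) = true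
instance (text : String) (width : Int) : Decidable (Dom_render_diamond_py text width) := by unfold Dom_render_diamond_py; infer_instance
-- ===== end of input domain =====

-- B makes a single pass over all output rows, deriving each row's padding from its distance to
-- the centre row and writing the two glyphs into a space-filled cell list by index assignment,
-- instead of A's two symmetric concatenation loops (objective: alternative).

-- ===== PORT A =====
-- ' ' * m  (negative m gives the empty string, as in Python)
def pvSpaces (m : Int) : List Char := List.replicate m.toNat ' '

-- f"{text:^{n}}" for n ≥ 0 (also exact for n ≤ len: both pads are empty): pad with spaces,
-- left pad = (n - len) // 2, remainder on the right — Python's '^' format rule.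
def pvCenter (cs : List Char) (n : Int) : List Char :=
  pvSpaces (PySem.Int.floordiv (n - cs.length) 2) ++ cs ++
    pvSpaces (n - cs.length - PySem.Int.floordiv (n - cs.length) 2)

def render_diamond_py (text : String) (width : Int) : String :=
  let inner := width - 4
  let lines : List (List Char) :=
    (PySem.List.pyRange 0 (PySem.Int.floordiv inner 2) 1).foldl
      (fun ls i => ls ++ [pvSpaces (i + 1) ++ ['╱'] ++ pvSpaces (inner - (i + 1) * 2) ++ ['╲']]) []
  let lines := lines ++ [[' '] ++ pvCenter text.toList inner ++ [' ']]
  let lines :=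
    (PySem.List.pyRange (PySem.Int.floordiv inner 2 - 1) (-1) (-1)).foldl
      (fun ls i => ls ++ [pvSpaces (i + 1) ++ ['╲'] ++ pvSpaces (inner - (i + 1) * 2) ++ ['╱']]) lines
  String.ofList (PySem.Chars.join ['\n'] lines)

-- ===== PORT B =====
-- row[i] = c  (Python index assignment; exact for -len ≤ i < len, which always holds here)
def pvSetIdx (xs : List Char) (i : Int) (c : Char) : List Char :=
  if i < 0 then xs.set ((xs.length : Int) + i).toNat c else xs.set i.toNat c

def render_diamond_py_alt (text : String) (width : Int) : String :=
  let inner := width - 4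
  let h := PySem.Int.floordiv inner 2
  let lines : List (List Char) :=
    (PySem.List.pyRange 0 (2 * h + 1) 1).foldl
      (fun ls r =>
        if r = h then ls ++ [[' '] ++ pvCenter text.toList inner ++ [' ']]
        else
          let p := (if r < h then r else 2 * h - r) + 1
          let row := List.replicate (inner - p + 2).toNat ' '
          let row := pvSetIdx row p (if r < h then '╱' else '╲')
          let row := pvSetIdx row (-1) (if r < h then '╲' else '╱')
          ls ++ [row]) []
  String.ofList (PySem.Chars.join ['\n'] lines)

-- ===== PRECONDITION & SPEC =====
-- A raises ValueError when inner_width = width - 4 is negative (the f-string format spec '^-k'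
-- has a sign); those inputs are excluded. A returns on every width ≥ 4.
def Pre_render_diamond_py (text : String) (width : Int) : Prop := 4 ≤ width
instance (text : String) (width : Int) : Decidable (Pre_render_diamond_py text width) := by
  unfold Pre_render_diamond_py; infer_instance
def pvWitness_render_diamond_py : String × Int := ("hi", 9)

def Spec_render_diamond_py (text : String) (width : Int) (out : String) : Prop := out = render_diamond_py_alt text width
instance (text : String) (width : Int) (out : String) : Decidable (Spec_render_diamond_py text width out) := by unfold Spec_render_diamond_py; infer_instance

-- ===== CLAIM (what is proved, stated in full; the proofs are below) =====
def Claim_equal_render_diamond_py : Prop := ∀ (text : String) (width : Int), Dom_render_diamond_py text width → Pre_render_diamond_py text width → Spec_render_diamond_py text width (render_diamond_py text width)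

-- ===== LEMMAS AND PROOFS =====

lemma pvSet_append_length {α : Type} (l m : List α) (x : α) :
    (l ++ m).set l.length x = l ++ m.set 0 x := by
  induction l with
  | nil => simp
  | cons a t ih => simp [ih]

lemma pvSet_replicate_prefix (a : Nat) (m : List Char) (x : Char) :
    (List.replicate a (' ' : Char) ++ m).set a x = List.replicate a ' ' ++ m.set 0 x := by
  have := pvSet_append_length (List.replicate a (' ' : Char)) m x
  rwa [List.length_replicate] at this

lemma pvRow_nat (a g : Nat) (g1 g2 : Char) :
    ((List.replicate (a + 1 + g + 1) (' ' : Char)).set a g1).set (a + 1 + g) g2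
      = List.replicate a ' ' ++ [g1] ++ List.replicate g ' ' ++ [g2] := by
  rw [show a + 1 + g + 1 = a + (1 + (g + 1)) by omega, List.replicate_add,
      pvSet_replicate_prefix]
  have h1 : (List.replicate (1 + (g + 1)) (' ' : Char)).set 0 g1
      = (g1 :: List.replicate g ' ') ++ [' '] := by
    rw [List.replicate_add, List.replicate_one, List.singleton_append, List.set_cons_zero,
        List.replicate_succ']
    simp
  rw [h1]
  have hlen : a + 1 + g = (List.replicate a (' ' : Char) ++ (g1 :: List.replicate g ' ')).length := by
    simp; omega
  rw [← List.append_assoc, hlen, pvSet_append_length]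
  simp

lemma pvRow_eq (inner p : Int) (g1 g2 : Char) (h0 : 0 ≤ p) (h2 : 2 * p ≤ inner) :
    pvSetIdx (pvSetIdx (List.replicate (inner - p + 2).toNat ' ') p g1) (-1) g2
      = pvSpaces p ++ [g1] ++ pvSpaces (inner - 2 * p) ++ [g2] := by
  have hN : (inner - p + 2).toNat = p.toNat + 1 + (inner - 2 * p).toNat + 1 := by omega
  simp only [pvSetIdx, List.length_set, List.length_replicate, if_neg (not_lt.2 h0),
    if_pos (show ((-1 : Int) < 0) by norm_num)]
  have hidx : (((inner - p + 2).toNat : Int) + (-1)).toNat = p.toNat + 1 + (inner - 2 * p).toNat := by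
    omega
  rw [hidx, hN, pvRow_nat]
  simp [pvSpaces]

theorem render_diamond_py_spec : Claim_equal_render_diamond_py := by
  intro text width _ hpre
  unfold Spec_render_diamond_py render_diamond_py render_diamond_py_alt
  dsimp only
  congr 1
  set inner := width - 4 with hinner
  have hin : 0 ≤ inner := by unfold Pre_render_diamond_py at hpre; omega
  have hfd : PySem.Int.floordiv inner 2 = inner / 2 :=
    PySem.Int.floordiv_eq_ediv_of_pos (by norm_num)
  rw [hfd]
  set h := inner / 2 with hh
  have hhn : 0 ≤ h := by omega
  have hbody : (fun (ls : List (List Char)) (r : Int) =>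
      if r = h then ls ++ [[' '] ++ pvCenter text.toList inner ++ [' ']]
      else
        let p := (if r < h then r else 2 * h - r) + 1
        let row := List.replicate (inner - p + 2).toNat ' '
        let row := pvSetIdx row p (if r < h then '╱' else '╲')
        let row := pvSetIdx row (-1) (if r < h then '╲' else '╱')
        ls ++ [row])
      = (fun ls r => ls ++ [if r = h then [' '] ++ pvCenter text.toList inner ++ [' ']
          else
            pvSetIdx (pvSetIdx (List.replicate (inner - ((if r < h then r else 2 * h - r) + 1) + 2).toNat ' ')
              ((if r < h then r else 2 * h - r) + 1) (if r < h then '╱' else '╲')) (-1)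
              (if r < h then '╲' else '╱')]) := by
    funext ls r; split <;> rfl
  rw [hbody, PySem.List.foldl_append_singleton_eq_map,
      PySem.List.foldl_append_singleton_eq_map, PySem.List.foldl_append_singleton_eq_map]
  simp only [List.nil_append]
  rw [PySem.List.pyRange_one 0 h, PySem.List.pyRange_neg_one (h - 1) (-1),
      PySem.List.pyRange_one 0 (2 * h + 1)]
  have hnat : (h - 0).toNat = h.toNat := by omega
  have hnat2 : (2 * h + 1 - 0).toNat = h.toNat + 1 + h.toNat := by omega
  have hnat3 : (h - 1 - (-1)).toNat = h.toNat := by omega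
  rw [hnat, hnat2, hnat3]
  rw [show h.toNat + 1 + h.toNat = (h.toNat + 1) + h.toNat from rfl, List.range_add,
      List.range_succ]
  simp only [List.map_append, List.map_map, List.append_assoc]
  refine congrArg (PySem.Chars.join ['\n']) ?_
  refine congrArg₂ (fun x y : List (List Char) => x ++ y) ?_ (congrArg₂ (fun x y : List (List Char) => x ++ y) ?_ ?_)
  · refine (List.map_congr_left fun k hk => ?_).symm
    have hk' : (k : Int) < h := by have := List.mem_range.1 hk; omega
    simp only [Function.comp]
    split_ifs with h1 h2
    · exact absurd h1 (by omega)
    · rw [pvRow_eq inner ((0 : Int) + k + 1) '╱' '╲' (by omega) (by omega)]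
      have : inner - ((0 : Int) + (k : Int) + 1) * 2 = inner - 2 * ((0 : Int) + k + 1) := by ring
      rw [this]; simp only [List.append_assoc]
    · exact absurd hk' (by omega)
  · simp only [Function.comp, List.map_cons, List.map_nil]
    rw [if_pos (by omega)]
  · refine (List.map_congr_left fun k hk => ?_).symm
    have hk' : (k : Int) < h := by have := List.mem_range.1 hk; omega
    simp only [Function.comp]
    push_cast
    split_ifs with h1 h2
    · exact absurd h1 (by omega)
    · exact absurd h2 (by omega)
    · have hp : 2 * h - ((0 : Int) + ((h.toNat : Int) + 1 + (k : Int))) = h - 1 - k := by omega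
      rw [hp]
      rw [pvRow_eq inner (h - 1 - (k : Int) + 1) '╲' '╱' (by omega) (by omega)]
      have : inner - (h - 1 - (k : Int) + 1) * 2 = inner - 2 * (h - 1 - (k : Int) + 1) := by ring
      rw [this]; simp only [List.append_assoc]
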